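-- pv_equiv track=rewrite | github.com/Vedant9500/Glassbox | scripts/benchmark_suite.py | _count_terms
-- ===== SOURCE A (Python) =====
-- def _count_terms(formula: str) -> int:
--     """Rough count of additive terms in a formula string."""
--     if not formula:
--         return 0
--     # Split on top-level + or - (not inside parentheses)
--     depth = 0
--     terms = 1
--     for ch in formula:
--         if ch in '(':
--             depth += 1
--         elif ch in ')':
--             depth -= 1
--         elif ch in '+-' and depth == 0:
--             terms += 1
--     return terms
-- ===== SOURCE B (Python) =====
-- def _count_terms(formula: str) -> int:
--     """Rough count of additive terms in a formula string."""
--     if not formula: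
--         return 0
--     # Stateless characterisation: a '+'/'-' at position i is top-level iff the
--     # prefix formula[:i] contains equally many '(' and ')'. No depth accumulator.
--     return 1 + sum(
--         ch in '+-' and formula.count('(', 0, i) == formula.count(')', 0, i)
--         for i, ch in enumerate(formula)
--     )
-- ===== Notes on version B (the rewrite author's own statement) =====
-- stated objective: alternative
-- what changed: B drops A's running depth accumulator entirely: it classifies each '+'/'-' independently by comparing the counts of '(' and ')' in the prefix before it (a stateless per-position test via str.count), summing the matches.
import Mathlib
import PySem

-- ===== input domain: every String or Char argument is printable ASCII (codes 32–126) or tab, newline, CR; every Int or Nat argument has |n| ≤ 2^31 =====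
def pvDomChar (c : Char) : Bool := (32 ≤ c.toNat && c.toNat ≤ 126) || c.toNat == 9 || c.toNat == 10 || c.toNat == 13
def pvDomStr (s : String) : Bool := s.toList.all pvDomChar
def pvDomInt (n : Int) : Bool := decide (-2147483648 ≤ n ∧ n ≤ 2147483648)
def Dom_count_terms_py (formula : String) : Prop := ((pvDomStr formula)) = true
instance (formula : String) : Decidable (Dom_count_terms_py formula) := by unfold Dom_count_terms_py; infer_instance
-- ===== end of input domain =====

-- B replaces A's running depth accumulator by a stateless per-position test: a sign is top-level iff its prefix holds equally many '(' and ')' (objective: alternative; not faster).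

-- ===== PORT A =====
-- one step of A's loop over the characters, on the state (depth, terms)
def pvStepA (s : Int × Int) (ch : Char) : Int × Int :=
  if ch = '(' then (s.1 + 1, s.2)
  else if ch = ')' then (s.1 - 1, s.2)
  else if (ch = '+' ∨ ch = '-') ∧ s.1 = 0 then (s.1, s.2 + 1)
  else s

def count_terms_py (formula : String) : Int :=
  if formula.toList = [] then 0
  else (formula.toList.foldl pvStepA (0, 1)).2

-- ===== PORT B =====
-- formula.count('(', 0, i) == formula.count(')', 0, i): paren counts of the prefix before i
-- (indices from enumerate are ≥ 0, so .toNat is exact here)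
def pvTopLevel (l : List Char) (i : Int) : Bool :=
  ((l.take i.toNat).count '(') == ((l.take i.toNat).count ')')

def count_terms_py_alt (formula : String) : Int :=
  if formula.toList = [] then 0
  else
    1 + (((PySem.List.enumerate formula.toList 0).filter
      (fun p => ((p.2 == '+') || (p.2 == '-')) && pvTopLevel formula.toList p.1)).length : Int)

-- ===== PRECONDITION & SPEC =====
def Spec_count_terms_py (formula : String) (out : Int) : Prop := out = count_terms_py_alt formula
instance (formula : String) (out : Int) : Decidable (Spec_count_terms_py formula out) := by unfold Spec_count_terms_py; infer_instance

-- ===== CLAIM (what is proved, stated in full; the proofs are below) =====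
def Claim_equal_count_terms_py : Prop := ∀ (formula : String), Dom_count_terms_py formula → Spec_count_terms_py formula (count_terms_py formula)

-- ===== LEMMAS AND PROOFS =====
-- proof-side helper: the number of top-level signs in a suffix, given the depth at its start
def pvCnt : List Char → Int → Int
  | [], _ => 0
  | c :: cs, d =>
    if c = '(' then pvCnt cs (d + 1)
    else if c = ')' then pvCnt cs (d - 1)
    else (if ((c == '+') || (c == '-')) && (d == (0 : Int)) then 1 else 0) + pvCnt cs d

-- A's fold from state (d, t) adds exactly pvCnt l d
theorem pv_fold_eq (l : List Char) : ∀ (d t : Int),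
    (l.foldl pvStepA (d, t)).2 = t + pvCnt l d := by
  induction l with
  | nil => intro d t; simp [pvCnt]
  | cons c cs ih =>
    intro d t
    by_cases hp : c = '('
    · simp [pvStepA, pvCnt, hp, ih]
    · by_cases hq : c = ')'
      · simp [pvStepA, pvCnt, hq, ih]
      · by_cases hpm : (c = '+' ∨ c = '-') ∧ d = 0
        · rcases hpm with ⟨hc, hd⟩
          rcases hc with h | h <;>
          · subst h; subst hd
            simp [pvStepA, pvCnt, hp, hq, ih]
            ring
        · have hsc : (((c == '+') || (c == '-')) && (d == (0 : Int))) = false := by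
            rcases not_and_or.mp hpm with hc | hd
            · rcases not_or.mp hc with ⟨h1, h2⟩; simp [h1, h2]
            · simp [hd]
          simp [pvStepA, pvCnt, hp, hq, hpm, hsc, ih]

-- counting a filtered cons, as an Int
theorem pv_len_filter_cons {α : Type} (p : α → Bool) (x : α) (xs : List α) :
    ((List.filter p (x :: xs)).length : Int)
      = (if p x = true then 1 else 0) + ((List.filter p xs).length : Int) := by
  by_cases h : p x = true <;> simp [List.filter_cons, h] <;> ring

-- B's stateless filter over a suffix, with the already-seen prefix made explicit, equals pvCnt
theorem pv_filter_eq (rest : List Char) : ∀ (pre : List Char),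
    (((PySem.List.enumerate rest (pre.length : Int)).filter
        (fun p => ((p.2 == '+') || (p.2 == '-')) && pvTopLevel (pre ++ rest) p.1)).length : Int)
      = pvCnt rest ((pre.count '(' : Int) - (pre.count ')' : Int)) := by
  induction rest with
  | nil => intro pre; simp [PySem.List.enumerate_nil, pvCnt]
  | cons c cs ih =>
    intro pre
    have happ : pre ++ c :: cs = (pre ++ [c]) ++ cs := by simp
    have hlen : (pre.length : Int) + 1 = (((pre ++ [c]).length : Int)) := by simp
    have htop : pvTopLevel ((pre ++ [c]) ++ cs) (pre.length : Int)
        = ((pre.count '(' == pre.count ')') : Bool) := by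
      have ht : ((pre ++ [c]) ++ cs).take pre.length = pre := by
        rw [List.append_assoc]
        exact List.take_left' rfl
      simp [pvTopLevel, ht]
    rw [PySem.List.enumerate_cons, pv_len_filter_cons]
    simp only [happ, hlen]
    rw [ih (pre ++ [c])]
    simp only [htop]
    by_cases hp : c = '('
    · have hd : ((pre ++ [c]).count '(' : Int) - ((pre ++ [c]).count ')' : Int)
          = ((pre.count '(' : Int) - (pre.count ')' : Int)) + 1 := by
        subst hp; simp [List.count_append]; try omega
      rw [hd]
      subst hp
      simp [pvCnt]
    · by_cases hq : c = ')'
      · have hd : ((pre ++ [c]).count '(' : Int) - ((pre ++ [c]).count ')' : Int)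
            = ((pre.count '(' : Int) - (pre.count ')' : Int)) - 1 := by
          subst hq; simp [List.count_append]; omega
        rw [hd]
        subst hq
        simp [pvCnt]
      · have hd : ((pre ++ [c]).count '(' : Int) - ((pre ++ [c]).count ')' : Int)
            = ((pre.count '(' : Int) - (pre.count ')' : Int)) := by
          simp [List.count_append, hp, hq]
        rw [hd]
        have hdz : ((pre.count '(' == pre.count ')') : Bool)
            = (((pre.count '(' : Int) - (pre.count ')' : Int)) == (0 : Int)) := by
          by_cases h : pre.count '(' = pre.count ')'
          · simp [h]
          · have h2 : ¬ ((pre.count '(' : Int) - (pre.count ')' : Int) = 0) := by omega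
            simp [h, h2]
        rw [hdz]
        by_cases hs : ((c == '+') || (c == '-')) = true
        · by_cases hz : ((pre.count '(' : Int) - (pre.count ')' : Int)) = 0
          · simp [pvCnt, hp, hq, hs, hz]
            try ring
          · simp [pvCnt, hp, hq, hs, hz]
        · simp only [Bool.or_eq_true, beq_iff_eq] at hs
          push_neg at hs
          simp [pvCnt, hp, hq, hs.1, hs.2]

-- ===== VERDICT (by name: the statement is the Claim_ definition above) =====
theorem count_terms_py_spec : Claim_equal_count_terms_py := by
  intro formula _
  unfold Spec_count_terms_py count_terms_py count_terms_py_alt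
  by_cases h : formula.toList = []
  · simp [h]
  · have := pv_filter_eq formula.toList []
    simp at this
    simp [h, pv_fold_eq, this]
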